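-- pv_equiv track=rewrite | github.com/AdvaithSai/Whatsapp_clone | src/tcs.py | office_rostering
-- ===== SOURCE A (Python) =====
-- from collections import defaultdict
--
-- def office_rostering(n, m, friendships, k):
--     # Create a dictionary to store friendships
--     friends = defaultdict(list)
--     for a, b in friendships:
--         friends[a].append(b)
--         friends[b].append(a)
--
--     # Initialize variables
--     working_today = [1] * n  # Everyone starts by working from office
--     rostering_value = n      # Initial rostering value
--     day = 1
--
--     # Loop until rostering value reaches or exceeds K
--     while rostering_value < k:
--         working_tomorrow = [0] * n  # Prepare next day's attendance
--
--         # Calculate next day's attendance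
--         for emp in range(n):
--             count_wfo_friends = sum(working_today[friend] for friend in friends[emp])
--
--             if working_today[emp] == 1:  # Current employee worked from office
--                 if count_wfo_friends == 3:
--                     working_tomorrow[emp] = 1
--             else:  # Current employee worked from home
--                 if count_wfo_friends < 3:
--                     working_tomorrow[emp] = 1
--
--         # Update rostering value
--         rostering_value += sum(working_tomorrow)
--
--         # Move to the next day
--         working_today = working_tomorrow
--         day += 1
--
--     return day
-- ===== SOURCE B (Python) =====
-- def office_rostering(n, m, friendships, k):
--     # Edge-scatter step (no adjacency dict) + state-cycle fast-forward.
--     def next_day(state):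
--         cnt = [0] * n
--         for a, b in friendships:
--             if 0 <= a < n:
--                 cnt[a] += state[b]
--             if 0 <= b < n:
--                 cnt[b] += state[a]
--         return [1 if (cnt[e] == 3 if state[e] == 1 else cnt[e] < 3) else 0
--                 for e in range(n)]
--
--     state = [1] * n
--     value = n
--     day = 1
--     seen = {}
--     while value < k:
--         key = tuple(state)
--         if key in seen:
--             d0, v0 = seen[key]
--             gain = value - v0
--             if gain > 0:
--                 cycles = (k - 1 - value) // gain
--                 day += cycles * (day - d0)
--                 value += cycles * gain
--         else:
--             seen[key] = (day, value)
--         state = next_day(state)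
--         value += sum(state)
--         day += 1
--     return day
-- ===== Notes on version B (the rewrite author's own statement) =====
-- stated objective: faster
-- what changed: B drops A's adjacency dict entirely (it scatters each edge into a per-day count array instead of gathering over friends[emp]) and, recording each state's (day, value), fast-forwards whole cycles of the deterministic automaton arithmetically with one floor division instead of simulating every day.
import Mathlib
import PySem

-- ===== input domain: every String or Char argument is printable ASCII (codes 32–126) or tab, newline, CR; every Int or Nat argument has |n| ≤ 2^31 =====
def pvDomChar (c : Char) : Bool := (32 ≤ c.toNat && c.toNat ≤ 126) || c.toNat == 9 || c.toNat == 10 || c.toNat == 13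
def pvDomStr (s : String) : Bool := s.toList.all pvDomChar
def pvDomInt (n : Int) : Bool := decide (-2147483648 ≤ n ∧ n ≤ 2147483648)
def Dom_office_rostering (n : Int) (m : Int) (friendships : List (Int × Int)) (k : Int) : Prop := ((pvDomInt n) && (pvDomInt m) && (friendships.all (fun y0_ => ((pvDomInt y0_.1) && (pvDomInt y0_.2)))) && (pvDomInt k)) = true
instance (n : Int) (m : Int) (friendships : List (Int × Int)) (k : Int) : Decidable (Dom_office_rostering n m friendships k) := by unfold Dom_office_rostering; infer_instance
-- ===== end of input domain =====

-- B drops A's per-employee adjacency dict (it scatters each edge into a per-day count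
-- array) and fast-forwards whole state cycles arithmetically instead of simulating
-- every day; equality of the RETURN value is proved on Pre_.

-- ===== PORT A =====
-- friends = defaultdict(list); friends[a].append(b); friends[b].append(a)
def pvFriendsA (friendships : List (Int × Int)) : PySem.Dict Int (List Int) :=
  friendships.foldl
    (fun d p => (d.modify p.1 [] (fun l => l ++ [p.2])).modify p.2 [] (fun l => l ++ [p.1]))
    PySem.Dict.empty

-- one day: working_tomorrow[emp] computed for emp in range(n); the indexings
-- working_today[friend] / working_today[emp] use pyGetD 0 — out-of-range reads
-- raise IndexError in Python and are excluded by Pre_ (in-range negative indices wrap, exact)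
def pvStepA (n : Int) (friends : PySem.Dict Int (List Int)) (today : List Int) : List Int :=
  (PySem.List.pyRange 0 n 1).map (fun emp =>
    let cnt := ((friends.getD emp []).map (fun f => PySem.List.pyGetD today f 0)).sum
    if PySem.List.pyGetD today emp 0 = 1 then (if cnt = 3 then (1 : Int) else 0)
    else (if cnt < 3 then (1 : Int) else 0))

-- while rostering_value < k: …  (fuel only makes the loop total; on Pre_ it is never exhausted)
def pvLoopA (k n : Int) (friends : PySem.Dict Int (List Int)) :
    List Int → Int → Int → Nat → Int
  | _, _, day, 0 => day
  | today, v, day, fuel+1 =>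
    if v < k then
      let tomorrow := pvStepA n friends today
      pvLoopA k n friends tomorrow (v + tomorrow.sum) (day + 1) fuel
    else day

def office_rostering (n : Int) (m : Int) (friendships : List (Int × Int)) (k : Int) : Int :=
  pvLoopA k n (pvFriendsA friendships) (List.replicate n.toNat 1) n 1 (2 * (k - n).toNat + 2)

-- ===== PORT B =====
-- cnt[a] += state[b] (guarded 0 <= a < n); cnt[b] += state[a] (guarded 0 <= b < n);
-- the state reads use pyGetD 0 exactly where Python indexes (raises excluded by Pre_)
def pvBumpB (n : Int) (state cnt : List Int) (idx f : Int) : List Int :=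
  if 0 ≤ idx ∧ idx < n then
    PySem.List.pySetD cnt idx (PySem.List.pyGetD cnt idx 0 + PySem.List.pyGetD state f 0)
  else cnt

-- cnt = [0]*n; for a, b in friendships: …
def pvCntB (n : Int) (friendships : List (Int × Int)) (state : List Int) : List Int :=
  friendships.foldl
    (fun cnt p => pvBumpB n state (pvBumpB n state cnt p.1 p.2) p.2 p.1)
    (List.replicate n.toNat 0)

-- [1 if (cnt[e] == 3 if state[e] == 1 else cnt[e] < 3) else 0 for e in range(n)]
def pvStepB (n : Int) (friendships : List (Int × Int)) (state : List Int) : List Int :=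
  let cnt := pvCntB n friendships state
  (PySem.List.pyRange 0 n 1).map (fun e =>
    if (if PySem.List.pyGetD state e 0 = 1 then PySem.List.pyGetD cnt e 0 = 3
        else PySem.List.pyGetD cnt e 0 < 3) then (1 : Int) else 0)

-- while value < k: look the state up in seen; on a repeat with positive gain,
-- fast-forward cycles = (k-1-value)//gain whole cycles; then one simulated day
def pvLoopB (k n : Int) (friendships : List (Int × Int)) :
    List Int → Int → Int → PySem.Dict (List Int) (Int × Int) → Nat → Int
  | _, _, day, _, 0 => day
  | state, value, day, seen, fuel+1 =>
    if value < k then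
      match seen.get? state with
      | some (d0, v0) =>
        let gain := value - v0
        if 0 < gain then
          let cycles := PySem.Int.floordiv (k - 1 - value) gain
          let day' := day + cycles * (day - d0)
          let value' := value + cycles * gain
          let nxt := pvStepB n friendships state
          pvLoopB k n friendships nxt (value' + nxt.sum) (day' + 1) seen fuel
        else
          let nxt := pvStepB n friendships state
          pvLoopB k n friendships nxt (value + nxt.sum) (day + 1) seen fuel
      | none =>
        let nxt := pvStepB n friendships state
        pvLoopB k n friendships nxt (value + nxt.sum) (day + 1)
          (seen.insert state (day, value)) fuel
    else day

def office_rostering_alt (n : Int) (m : Int) (friendships : List (Int × Int)) (k : Int) : Int :=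
  pvLoopB k n friendships (List.replicate n.toNat 1) n 1 PySem.Dict.empty
    (2 * (k - n).toNat + 2)

-- ===== PRECONDITION & SPEC =====
-- Pre_ excludes exactly the inputs on which Python A never returns: an IndexError
-- (some friendship incident to an employee 0 ≤ e < n has its partner outside [-n, n),
-- so working_today[partner] raises during the first day's scan) or an infinite loop
-- (n ≤ 0 with k > n: the rostering value stays n forever).
def Pre_office_rostering (n : Int) (m : Int) (friendships : List (Int × Int)) (k : Int) : Prop :=
  k ≤ n ∨ (1 ≤ n ∧ ∀ p ∈ friendships,
    ((0 ≤ p.1 ∧ p.1 < n) → PySem.Raise.InRange n.toNat p.2) ∧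
    ((0 ≤ p.2 ∧ p.2 < n) → PySem.Raise.InRange n.toNat p.1))
instance (n : Int) (m : Int) (friendships : List (Int × Int)) (k : Int) : Decidable (Pre_office_rostering n m friendships k) := by unfold Pre_office_rostering; infer_instance

def pvWitness_office_rostering : Int × Int × (List (Int × Int)) × Int := (3, 1, [(0, 1)], 5)

def Spec_office_rostering (n : Int) (m : Int) (friendships : List (Int × Int)) (k : Int) (out : Int) : Prop := out = office_rostering_alt n m friendships k
instance (n : Int) (m : Int) (friendships : List (Int × Int)) (k : Int) (out : Int) : Decidable (Spec_office_rostering n m friendships k out) := by unfold Spec_office_rostering; infer_instance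

-- ===== CLAIM (what is proved, stated in full; the proofs are below) =====
def Claim_equal_office_rostering : Prop := ∀ (n : Int) (m : Int) (friendships : List (Int × Int)) (k : Int), Dom_office_rostering n m friendships k → Pre_office_rostering n m friendships k → Spec_office_rostering n m friendships k (office_rostering n m friendships k)

-- ===== LEMMAS AND PROOFS =====

-- the contribution list: which neighbours A's dict records for employee e
def pvContrib (e : Int) (fs : List (Int × Int)) : List Int :=
  fs.flatMap (fun p => (if e = p.1 then [p.2] else []) ++ (if e = p.2 then [p.1] else []))

lemma contrib_cons (e : Int) (p : Int × Int) (fs : List (Int × Int)) :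
    pvContrib e (p :: fs) =
      ((if e = p.1 then [p.2] else []) ++ (if e = p.2 then [p.1] else [])) ++ pvContrib e fs := by
  simp [pvContrib]

-- A's dict lookup is exactly the contribution list
lemma friendsA_getD_aux (fs : List (Int × Int)) : ∀ (d : PySem.Dict Int (List Int)) (e : Int),
    (fs.foldl (fun d p =>
        (d.modify p.1 [] (fun l => l ++ [p.2])).modify p.2 [] (fun l => l ++ [p.1])) d).getD e [] =
      d.getD e [] ++ pvContrib e fs := by
  induction fs with
  | nil => intro d e; simp [pvContrib]
  | cons p rest ih =>
    intro d e
    simp only [List.foldl_cons]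
    rw [ih, contrib_cons]
    simp only [PySem.Dict.getD_modify]
    by_cases h2 : e = p.2 <;> by_cases h1 : e = p.1 <;>
      simp only [h1, h2] <;>
      simp_all [List.append_assoc]

lemma friendsA_getD (fs : List (Int × Int)) (e : Int) :
    (pvFriendsA fs).getD e [] = pvContrib e fs := by
  unfold pvFriendsA
  rw [friendsA_getD_aux]
  rfl

lemma length_bumpB (n : Int) (state cnt : List Int) (idx f : Int) :
    (pvBumpB n state cnt idx f).length = cnt.length := by
  unfold pvBumpB
  split_ifs with h
  · rw [PySem.List.pySetD_of_nonneg _ _ h.1]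
    simp
  · rfl

lemma pyGetD_bumpB (n : Int) (state cnt : List Int) (idx f e : Int)
    (hlen : cnt.length = n.toNat) (he0 : 0 ≤ e) (hen : e < n) :
    PySem.List.pyGetD (pvBumpB n state cnt idx f) e 0 =
      PySem.List.pyGetD cnt e 0 + (if e = idx then PySem.List.pyGetD state f 0 else 0) := by
  unfold pvBumpB
  split_ifs with h hi hi
  · -- idx in range, e = idx
    subst hi
    rw [PySem.List.pySetD_of_nonneg _ _ h.1]
    have hlt : e.toNat < cnt.length := by omega
    rw [PySem.List.pyGetD_of_nonneg _ _ he0, PySem.List.pyGetD_of_nonneg _ _ he0]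
    simp [List.getD, List.getElem?_set, hlt]
  · -- idx in range, e ≠ idx
    rw [PySem.List.pySetD_of_nonneg _ _ h.1]
    have hne : e.toNat ≠ idx.toNat := by omega
    rw [PySem.List.pyGetD_of_nonneg _ _ he0, PySem.List.pyGetD_of_nonneg _ _ he0]
    simp [List.getD, List.getElem?_set, Ne.symm hne]
  · -- idx out of range but e = idx: impossible
    exact absurd (hi ▸ ⟨he0, hen⟩) h
  · simp

lemma pyGetD_replicate_zero (m : Nat) (i : Int) :
    PySem.List.pyGetD (List.replicate m (0 : Int)) i 0 = 0 := by
  unfold PySem.List.pyGetD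
  cases h : PySem.List.pyGet? (List.replicate m (0 : Int)) i with
  | none => rfl
  | some x =>
    have := PySem.List.mem_of_pyGet?_eq_some _ h
    simp [List.eq_of_mem_replicate this]

-- the scattered counts equal the gathered sums
lemma cntB_fold (n : Int) (state : List Int) (fs : List (Int × Int)) :
    ∀ (cnt : List Int), cnt.length = n.toNat → ∀ e, 0 ≤ e → e < n →
    PySem.List.pyGetD (fs.foldl
        (fun cnt p => pvBumpB n state (pvBumpB n state cnt p.1 p.2) p.2 p.1) cnt) e 0 =
      PySem.List.pyGetD cnt e 0 +
        ((pvContrib e fs).map (fun f => PySem.List.pyGetD state f 0)).sum := by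
  induction fs with
  | nil => intro cnt _ e _ _; simp [pvContrib]
  | cons p rest ih =>
    intro cnt hlen e he0 hen
    simp only [List.foldl_cons]
    have hlen1 : (pvBumpB n state cnt p.1 p.2).length = n.toNat := by
      rw [length_bumpB]; exact hlen
    have hlen2 : (pvBumpB n state (pvBumpB n state cnt p.1 p.2) p.2 p.1).length = n.toNat := by
      rw [length_bumpB]; exact hlen1
    rw [ih _ hlen2 e he0 hen, pyGetD_bumpB n state _ p.2 p.1 e hlen1 he0 hen,
      pyGetD_bumpB n state cnt p.1 p.2 e hlen he0 hen, contrib_cons]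
    split_ifs with h1 h2 h2 <;> simp [h1, h2] <;> ring

lemma cntB_getD (n : Int) (fs : List (Int × Int)) (state : List Int) (e : Int)
    (he0 : 0 ≤ e) (hen : e < n) :
    PySem.List.pyGetD (pvCntB n fs state) e 0 =
      ((pvContrib e fs).map (fun f => PySem.List.pyGetD state f 0)).sum := by
  unfold pvCntB
  rw [cntB_fold n state fs (List.replicate n.toNat 0) (by simp) e he0 hen,
    pyGetD_replicate_zero]
  omega

-- B's step equals A's step
lemma stepB_eq (n : Int) (fs : List (Int × Int)) (t : List Int) :
    pvStepB n fs t = pvStepA n (pvFriendsA fs) t := by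
  unfold pvStepB pvStepA
  apply List.map_congr_left
  intro e he
  rw [PySem.List.mem_pyRange_one] at he
  rw [cntB_getD n fs t e he.1 he.2, friendsA_getD]
  by_cases hp : PySem.List.pyGetD t e 0 = 1 <;> simp [hp]

lemma loopA_succ (k n : Int) (d : PySem.Dict Int (List Int)) (t : List Int) (v day : Int) (fuel : Nat) :
    pvLoopA k n d t v day (fuel+1) =
      if v < k then
        pvLoopA k n d (pvStepA n d t) (v + (pvStepA n d t).sum) (day + 1) fuel
      else day := by
  rfl

lemma loopA_stop (k n : Int) (d : PySem.Dict Int (List Int)) (t : List Int) (v day : Int)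
    (fuel : Nat) (h : ¬ v < k) (hf : 1 ≤ fuel) :
    pvLoopA k n d t v day fuel = day := by
  cases fuel with
  | zero => omega
  | succ f => simp [loopA_succ, h]

lemma loopB_stop (k n : Int) (fs : List (Int × Int)) (t : List Int) (v day : Int)
    (seen : PySem.Dict (List Int) (Int × Int)) (fuel : Nat) (h : ¬ v < k) (hf : 1 ≤ fuel) :
    pvLoopB k n fs t v day seen fuel = day := by
  cases fuel with
  | zero => omega
  | succ f => simp [pvLoopB, h]

-- every entry of a step output is 0 or 1
lemma step_mem01 (n : Int) (d : PySem.Dict Int (List Int)) (t : List Int) :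
    ∀ x ∈ pvStepA n d t, x = 0 ∨ x = 1 := by
  intro x hx
  unfold pvStepA at hx
  rw [List.mem_map] at hx
  obtain ⟨emp, _, he⟩ := hx
  rw [← he]
  split_ifs <;> simp <;> omega

lemma sum01_nonneg (l : List Int) (h : ∀ x ∈ l, x = 0 ∨ x = 1) : 0 ≤ l.sum := by
  induction l with
  | nil => simp
  | cons x xs ih =>
    have hx := h x (by simp)
    have hxs := ih (fun y hy => h y (by simp [hy]))
    simp only [List.sum_cons]
    omega

lemma sum01_zero (l : List Int) (h : ∀ x ∈ l, x = 0 ∨ x = 1) (hz : l.sum = 0) :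
    ∀ x ∈ l, x = 0 := by
  induction l with
  | nil => simp
  | cons x xs ih =>
    have hx := h x (by simp)
    have hxs := sum01_nonneg xs (fun y hy => h y (by simp [hy]))
    simp only [List.sum_cons] at hz
    intro y hy
    rcases List.mem_cons.1 hy with rfl | hy'
    · omega
    · exact ih (fun z hz' => h z (by simp [hz'])) (by omega) y hy'

lemma step_sum_nonneg (n : Int) (d : PySem.Dict Int (List Int)) (t : List Int) :
    0 ≤ (pvStepA n d t).sum :=
  sum01_nonneg _ (step_mem01 n d t)

lemma step_length (n : Int) (d : PySem.Dict Int (List Int)) (t : List Int) :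
    (pvStepA n d t).length = n.toNat := by
  unfold pvStepA
  simp [PySem.List.length_pyRange_one]

lemma step_sum_zero (n : Int) (d : PySem.Dict Int (List Int)) (t : List Int)
    (hz : (pvStepA n d t).sum = 0) : pvStepA n d t = List.replicate n.toNat 0 := by
  rw [List.eq_replicate_iff]
  exact ⟨step_length n d t, sum01_zero _ (step_mem01 n d t) hz⟩

lemma sum_map_one (l : List Int) : (l.map (fun _ => (1 : Int))).sum = l.length := by
  induction l with
  | nil => simp
  | cons x xs ih => simp; omega

lemma step_zeros (n : Int) (d : PySem.Dict Int (List Int)) (hn : 1 ≤ n) :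
    (pvStepA n d (List.replicate n.toNat 0)).sum = n := by
  have hmap : pvStepA n d (List.replicate n.toNat 0) =
      (PySem.List.pyRange 0 n 1).map (fun _ => (1 : Int)) := by
    unfold pvStepA
    apply List.map_congr_left
    intro emp _
    have hcnt : ((d.getD emp []).map
        (fun f => PySem.List.pyGetD (List.replicate n.toNat (0 : Int)) f 0)).sum = 0 := by
      apply List.sum_eq_zero
      intro x hx
      rw [List.mem_map] at hx
      obtain ⟨f, _, hf⟩ := hx
      rw [← hf]
      exact pyGetD_replicate_zero n.toNat f
    simp [pyGetD_replicate_zero]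
  rw [hmap, sum_map_one, PySem.List.length_pyRange_one]
  omega

-- The true trajectory of the automaton: states and cumulative values by day index
def pvS (n : Int) (fs : List (Int × Int)) : Nat → List Int
  | 0 => List.replicate n.toNat 1
  | i+1 => pvStepA n (pvFriendsA fs) (pvS n fs i)

def pvV (n : Int) (fs : List (Int × Int)) : Nat → Int
  | 0 => n
  | i+1 => pvV n fs i + (pvS n fs (i+1)).sum

-- seen is sound at index i: every entry is an earlier trajectory point
def pvGood (n : Int) (fs : List (Int × Int)) (seen : PySem.Dict (List Int) (Int × Int)) (i : Nat) : Prop :=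
  ∀ s d0 v0, seen.get? s = some (d0, v0) →
    ∃ j : Nat, j < i ∧ pvS n fs j = s ∧ pvV n fs j = v0 ∧ d0 = 1 + (j : Int)

lemma pvS_succ (n : Int) (fs : List (Int × Int)) (i : Nat) :
    pvS n fs (i+1) = pvStepA n (pvFriendsA fs) (pvS n fs i) := rfl

lemma pvV_succ (n : Int) (fs : List (Int × Int)) (i : Nat) :
    pvV n fs (i+1) = pvV n fs i + (pvS n fs (i+1)).sum := rfl

lemma pvS_sum_nonneg (n : Int) (fs : List (Int × Int)) (i : Nat) :
    0 ≤ (pvS n fs (i+1)).sum := by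
  rw [pvS_succ]; exact step_sum_nonneg _ _ _

lemma pvV_mono (n : Int) (fs : List (Int × Int)) (i j : Nat) (h : i ≤ j) :
    pvV n fs i ≤ pvV n fs j := by
  induction j with
  | zero => simp_all
  | succ j ih =>
    rcases Nat.lt_or_ge i (j+1) with hij | hij
    · have := ih (by omega)
      have := pvS_sum_nonneg n fs j
      rw [pvV_succ]
      omega
    · have : i = j + 1 := by omega
      simp [this]

-- no-progress step forces the all-zero state
lemma pvV_stall (n : Int) (fs : List (Int × Int)) (i : Nat)
    (h : pvV n fs (i+1) = pvV n fs i) : pvS n fs (i+1) = List.replicate n.toNat 0 := by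
  have hz : (pvS n fs (i+1)).sum = 0 := by
    have := pvV_succ n fs i
    omega
  rw [pvS_succ] at hz ⊢
  exact step_sum_zero _ _ _ hz

-- from the all-zero state the next day gains n
lemma pvV_zero_gain (n : Int) (fs : List (Int × Int)) (i : Nat) (hn : 1 ≤ n)
    (h : pvS n fs i = List.replicate n.toNat 0) : pvV n fs i + n ≤ pvV n fs (i+1) := by
  have : (pvS n fs (i+1)).sum = n := by
    rw [pvS_succ, h]
    exact step_zeros n _ hn
  rw [pvV_succ, this]

-- two consecutive days always gain at least 1
lemma pvV_progress (n : Int) (fs : List (Int × Int)) (i : Nat) (hn : 1 ≤ n) :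
    pvV n fs i + 1 ≤ pvV n fs (i+2) := by
  by_cases h : pvV n fs (i+1) = pvV n fs i
  · have hz := pvV_stall n fs i h
    have h2 := pvV_zero_gain n fs (i+1) hn hz
    have e : i + 1 + 1 = i + 2 := by omega
    rw [e] at h2
    omega
  · have h1 := pvV_mono n fs i (i+1) (by omega)
    have h2 := pvV_mono n fs (i+1) (i+2) (by omega)
    omega

-- a state repeat makes the trajectory periodic
lemma pvS_period (n : Int) (fs : List (Int × Int)) (j L : Nat)
    (h : pvS n fs (j + L) = pvS n fs j) :
    ∀ t r : Nat, pvS n fs (j + r + t * L) = pvS n fs (j + r) := by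
  have single : ∀ r : Nat, pvS n fs (j + r + L) = pvS n fs (j + r) := by
    intro r
    induction r with
    | zero => simpa using h
    | succ r ih =>
      have e1 : j + (r+1) + L = (j + r + L) + 1 := by omega
      have e2 : j + (r+1) = (j + r) + 1 := by omega
      rw [e1, e2, pvS_succ, pvS_succ, ih]
  intro t
  induction t with
  | zero => simp
  | succ t ih =>
    intro r
    have e : j + r + (t+1) * L = j + (r + t * L) + L := by ring
    rw [e, single (r + t * L), ← Nat.add_assoc, ih r]

-- cycle fast-forward: states repeat, values grow linearly
lemma pv_cycle (n : Int) (fs : List (Int × Int)) (j L : Nat) (_hL : 1 ≤ L)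
    (h : pvS n fs (j + L) = pvS n fs j) (c : Nat) :
    pvS n fs (j + L + c * L) = pvS n fs (j + L) ∧
    pvV n fs (j + L + c * L) = pvV n fs (j + L) + c * (pvV n fs (j + L) - pvV n fs j) := by
  have per := pvS_period n fs j L h
  have shift : ∀ (p q : Nat), (∀ r : Nat, pvS n fs (p + r) = pvS n fs (q + r)) →
      ∀ M : Nat, pvV n fs (p + M) - pvV n fs p = pvV n fs (q + M) - pvV n fs q := by
    intro p q hpq M
    induction M with
    | zero => simp
    | succ M ih =>
      have e1 : p + (M+1) = (p + M) + 1 := by omega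
      have e2 : q + (M+1) = (q + M) + 1 := by omega
      have hs : pvS n fs ((p + M) + 1) = pvS n fs ((q + M) + 1) := by
        rw [← e1, ← e2, hpq (M+1)]
      rw [e1, e2, pvV_succ, pvV_succ, hs]
      omega
  induction c with
  | zero => simp
  | succ c ih =>
    obtain ⟨ihS, ihV⟩ := ih
    have hshift : ∀ r : Nat, pvS n fs ((j + L + c * L) + r) = pvS n fs (j + r) := by
      intro r
      have e : j + L + c * L + r = j + r + (c+1) * L := by ring
      rw [e, per (c+1) r]
    have hgain := shift (j + L + c * L) j hshift L
    have eS : j + L + (c+1) * L = (j + L + c * L) + L := by ring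
    constructor
    · rw [eS]
      have hp := per (c+2) 0
      have e2 : j + 0 + (c+2) * L = j + L + c * L + L := by ring
      rw [e2] at hp
      rw [hp]
      have hp1 := per 1 0
      have e3 : j + 0 + 1 * L = j + L := by ring
      rw [e3] at hp1
      simpa using hp1.symm
    · rw [eS]
      have : pvV n fs ((j + L + c * L) + L) - pvV n fs (j + L + c * L) =
          pvV n fs (j + L) - pvV n fs j := hgain
      push_cast
      nlinarith [this, ihV]

lemma loopA_succ_traj (k n : Int) (fs : List (Int × Int)) (i : Nat) (fuel : Nat)
    (hv : pvV n fs i < k) :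
    pvLoopA k n (pvFriendsA fs) (pvS n fs i) (pvV n fs i) (1 + (i : Int)) (fuel+1) =
    pvLoopA k n (pvFriendsA fs) (pvS n fs (i+1)) (pvV n fs (i+1)) (1 + ((i+1 : Nat) : Int)) fuel := by
  rw [loopA_succ, if_pos hv]
  have hday : (1 : Int) + (i : Int) + 1 = 1 + ((i+1 : Nat) : Int) := by push_cast; ring
  rw [hday, ← pvS_succ, ← pvV_succ]

-- running A's loop along L trajectory days (all strictly below k)
lemma loopA_run (k n : Int) (fs : List (Int × Int)) (L : Nat) :
    ∀ (i fuel : Nat), pvV n fs (i + L) < k →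
    pvLoopA k n (pvFriendsA fs) (pvS n fs i) (pvV n fs i) (1 + (i : Int)) (L + fuel) =
    pvLoopA k n (pvFriendsA fs) (pvS n fs (i + L)) (pvV n fs (i + L)) (1 + ((i + L : Nat) : Int)) fuel := by
  induction L with
  | zero => intro i fuel _; simp
  | succ L ih =>
    intro i fuel h
    have hv : pvV n fs i < k :=
      lt_of_le_of_lt (pvV_mono n fs i (i + (L+1)) (by omega)) h
    have e1 : L + 1 + fuel = (L + fuel) + 1 := by omega
    rw [e1, loopA_succ_traj k n fs i (L + fuel) hv]
    have h' : pvV n fs ((i+1) + L) < k := by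
      have e : (i+1) + L = i + (L+1) := by omega
      rw [e]; exact h
    have := ih (i+1) fuel h'
    have e2 : (i+1) + L = i + (L+1) := by omega
    rw [e2] at this
    exact this

-- A's loop result does not depend on the fuel once the fuel is sufficient
lemma loopA_stable (k n : Int) (fs : List (Int × Int)) (hn : 1 ≤ n) (c : Nat) :
    ∀ (i f f' : Nat), (k - pvV n fs i).toNat ≤ c →
    2 * (k - pvV n fs i).toNat + 2 ≤ f → 2 * (k - pvV n fs i).toNat + 2 ≤ f' →
    pvLoopA k n (pvFriendsA fs) (pvS n fs i) (pvV n fs i) (1 + (i : Int)) f =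
    pvLoopA k n (pvFriendsA fs) (pvS n fs i) (pvV n fs i) (1 + (i : Int)) f' := by
  induction c with
  | zero =>
    intro i f f' hc hf hf'
    have hv : ¬ pvV n fs i < k := by omega
    rw [loopA_stop _ _ _ _ _ _ _ hv (by omega), loopA_stop _ _ _ _ _ _ _ hv (by omega)]
  | succ c ih =>
    intro i f f' hc hf hf'
    by_cases hv : pvV n fs i < k
    · have hg1 : 1 ≤ (k - pvV n fs i).toNat := by omega
      obtain ⟨f1, rfl⟩ : ∃ f1, f = f1 + 1 := ⟨f - 1, by omega⟩
      obtain ⟨f1', rfl⟩ : ∃ f1', f' = f1' + 1 := ⟨f' - 1, by omega⟩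
      rw [loopA_succ_traj k n fs i f1 hv, loopA_succ_traj k n fs i f1' hv]
      have hmono := pvV_mono n fs i (i+1) (by omega)
      by_cases hq : pvV n fs i < pvV n fs (i+1)
      · exact ih (i+1) f1 f1' (by omega) (by omega) (by omega)
      · have heq : pvV n fs (i+1) = pvV n fs i := by omega
        have hv' : pvV n fs (i+1) < k := by omega
        obtain ⟨f2, rfl⟩ : ∃ f2, f1 = f2 + 1 := ⟨f1 - 1, by omega⟩
        obtain ⟨f2', rfl⟩ : ∃ f2', f1' = f2' + 1 := ⟨f1' - 1, by omega⟩
        rw [loopA_succ_traj k n fs (i+1) f2 hv', loopA_succ_traj k n fs (i+1) f2' hv']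
        have hprog := pvV_progress n fs i hn
        have e : i + 1 + 1 = i + 2 := by omega
        rw [e] at *
        exact ih (i+2) f2 f2' (by omega) (by omega) (by omega)
    · rw [loopA_stop _ _ _ _ _ _ _ hv (by omega), loopA_stop _ _ _ _ _ _ _ hv (by omega)]

lemma loopB_succ_none (k n : Int) (fs : List (Int × Int)) (state : List Int)
    (value day : Int) (seen : PySem.Dict (List Int) (Int × Int)) (fuel : Nat)
    (h : seen.get? state = none) :
    pvLoopB k n fs state value day seen (fuel+1) =
      if value < k then
        pvLoopB k n fs (pvStepB n fs state) (value + (pvStepB n fs state).sum) (day + 1)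
          (seen.insert state (day, value)) fuel
      else day := by
  simp only [pvLoopB, h]

lemma loopB_succ_some (k n : Int) (fs : List (Int × Int)) (state : List Int)
    (value day d0 v0 : Int) (seen : PySem.Dict (List Int) (Int × Int)) (fuel : Nat)
    (h : seen.get? state = some (d0, v0)) :
    pvLoopB k n fs state value day seen (fuel+1) =
      if value < k then
        if 0 < value - v0 then
          pvLoopB k n fs (pvStepB n fs state)
            (value + PySem.Int.floordiv (k - 1 - value) (value - v0) * (value - v0) +
              (pvStepB n fs state).sum)
            (day + PySem.Int.floordiv (k - 1 - value) (value - v0) * (day - d0) + 1) seen fuel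
        else
          pvLoopB k n fs (pvStepB n fs state) (value + (pvStepB n fs state).sum) (day + 1)
            seen fuel
      else day := by
  simp only [pvLoopB, h]

-- one iteration of B's loop advances the trajectory and matches A
lemma one_iter (k n : Int) (fs : List (Int × Int)) (hn : 1 ≤ n) (i : Nat)
    (seen : PySem.Dict (List Int) (Int × Int)) (hv : pvV n fs i < k)
    (hg : pvGood n fs seen i) :
    ∃ (i' : Nat) (seen' : PySem.Dict (List Int) (Int × Int)),
      i < i' ∧
      pvS n fs i' = pvS n fs (i+1) ∧
      pvV n fs i + (pvS n fs (i+1)).sum ≤ pvV n fs i' ∧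
      pvGood n fs seen' i' ∧
      (∀ fuel : Nat,
        pvLoopB k n fs (pvS n fs i) (pvV n fs i) (1 + (i : Int)) seen (fuel+1) =
        pvLoopB k n fs (pvS n fs i') (pvV n fs i') (1 + (i' : Int)) seen' fuel) ∧
      (∀ fA fA' : Nat, 2 * (k - pvV n fs i).toNat + 3 ≤ fA →
        2 * (k - pvV n fs i').toNat + 2 ≤ fA' →
        pvLoopA k n (pvFriendsA fs) (pvS n fs i) (pvV n fs i) (1 + (i : Int)) fA =
        pvLoopA k n (pvFriendsA fs) (pvS n fs i') (pvV n fs i') (1 + (i' : Int)) fA') := by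
  have hmono1 := pvV_mono n fs i (i+1) (by omega)
  have hday1 : (1 : Int) + (i : Int) + 1 = 1 + ((i+1 : Nat) : Int) := by push_cast; ring
  cases hseen : seen.get? (pvS n fs i) with
  | none =>
    refine ⟨i+1, seen.insert (pvS n fs i) (1 + (i : Int), pvV n fs i), by omega, rfl,
      le_of_eq (pvV_succ n fs i).symm, ?_, ?_, ?_⟩
    · intro s d0 v0 hsome
      rw [PySem.Dict.get?_insert] at hsome
      split_ifs at hsome with hs
      · obtain ⟨hd, hvv⟩ := Prod.mk.injEq .. ▸ Option.some.inj hsome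
        exact ⟨i, by omega, hs.symm, hvv, hd.symm⟩
      · obtain ⟨j, hji, hSj, hVj, hd0⟩ := hg s d0 v0 hsome
        exact ⟨j, by omega, hSj, hVj, hd0⟩
    · intro fuel
      rw [loopB_succ_none k n _ _ _ _ _ _ hseen, if_pos hv, stepB_eq, ← pvS_succ,
        ← pvV_succ, hday1]
    · intro fA fA' hfA hfA'
      obtain ⟨f, rfl⟩ : ∃ f, fA = f + 1 := ⟨fA - 1, by omega⟩
      rw [loopA_succ_traj k n fs i f hv]
      exact loopA_stable k n fs hn ((k - pvV n fs (i+1)).toNat) (i+1) f fA'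
        (le_refl _) (by omega) hfA'
  | some dv =>
    obtain ⟨d0, v0⟩ := dv
    obtain ⟨j, hj, hSj, hVj, hd0⟩ := hg _ _ _ hseen
    have hiL : j + (i - j) = i := by omega
    have hL1 : 1 ≤ i - j := by omega
    have hper : pvS n fs (j + (i - j)) = pvS n fs j := by rw [hiL]; exact hSj.symm
    have hmonoji := pvV_mono n fs j i (by omega)
    have hgood' : ∀ i'' : Nat, i ≤ i'' → pvGood n fs seen i'' := by
      intro i'' hii'' s d0' v0' hsome
      obtain ⟨j', hj', hSj', hVj', hd0'⟩ := hg s d0' v0' hsome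
      exact ⟨j', by omega, hSj', hVj', hd0'⟩
    by_cases hgain : 0 < pvV n fs i - v0
    · -- fast-forward branch
      set cI := PySem.Int.floordiv (k - 1 - pvV n fs i) (pvV n fs i - v0) with hcI
      have hknn : 0 ≤ k - 1 - pvV n fs i := by omega
      have hcnn : 0 ≤ cI := Int.fdiv_nonneg hknn (le_of_lt hgain)
      have hfloor : cI * (pvV n fs i - v0) ≤ k - 1 - pvV n fs i := by
        have h1 := Int.mul_fdiv_add_fmod (k - 1 - pvV n fs i) (pvV n fs i - v0)
        have h2 := Int.fmod_nonneg (a := k - 1 - pvV n fs i) (b := pvV n fs i - v0)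
          hknn (le_of_lt hgain)
        have hcI2 : cI = (k - 1 - pvV n fs i).fdiv (pvV n fs i - v0) := rfl
        rw [hcI2]
        nlinarith
      have hcast : ((cI.toNat : Int)) = cI := Int.toNat_of_nonneg hcnn
      obtain ⟨hcS, hcV⟩ := pv_cycle n fs j (i - j) hL1 hper cI.toNat
      rw [hiL] at hcS hcV
      have hcV' : pvV n fs (i + cI.toNat * (i - j)) = pvV n fs i + cI * (pvV n fs i - v0) := by
        rw [hcV, hVj, hcast]
      have hvk' : pvV n fs (i + cI.toNat * (i - j)) < k := by
        rw [hcV']; linarith [hfloor]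
      refine ⟨i + cI.toNat * (i - j) + 1, seen, by omega, ?_, ?_, hgood' _ (by omega), ?_, ?_⟩
      · rw [pvS_succ, hcS, ← pvS_succ]
      · have hVi' : pvV n fs (i + cI.toNat * (i - j) + 1) =
            pvV n fs i + cI * (pvV n fs i - v0) + (pvS n fs (i+1)).sum := by
          rw [pvV_succ, hcV']
          congr 2
          rw [pvS_succ, hcS, ← pvS_succ]
        rw [hVi']
        have := mul_nonneg hcnn (le_of_lt hgain)
        omega
      · intro fuel
        have hVi' : pvV n fs (i + cI.toNat * (i - j) + 1) =
            pvV n fs i + cI * (pvV n fs i - v0) + (pvS n fs (i+1)).sum := by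
          rw [pvV_succ, hcV']
          congr 2
          rw [pvS_succ, hcS, ← pvS_succ]
        have hday : (1 : Int) + ((i + cI.toNat * (i - j) + 1 : Nat) : Int) =
            1 + (i : Int) + cI * ((1 + (i : Int)) - d0) + 1 := by
          rw [hd0]
          have hLc : ((i - j : Nat) : Int) = (i : Int) - (j : Int) := by omega
          push_cast [hLc, hcast]
          ring
        rw [loopB_succ_some k n _ _ _ _ d0 v0 _ _ hseen, if_pos hv, if_pos hgain,
          stepB_eq, ← pvS_succ, ← hcI, ← hVi', hday]
        rw [show pvS n fs (i + cI.toNat * (i - j) + 1) = pvS n fs (i + 1) from by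
          rw [pvS_succ, hcS, ← pvS_succ]]
      · intro fA fA' hfA hfA'
        set fM := max fA' (2 * (k - pvV n fs i).toNat + 2) with hfM
        have step1 : pvLoopA k n (pvFriendsA fs) (pvS n fs i) (pvV n fs i) (1 + (i : Int)) fA =
            pvLoopA k n (pvFriendsA fs) (pvS n fs i) (pvV n fs i) (1 + (i : Int))
              (cI.toNat * (i - j) + (fM + 1)) :=
          loopA_stable k n fs hn ((k - pvV n fs i).toNat) i _ _ (le_refl _) (by omega)
            (by omega)
        rw [step1, loopA_run k n fs (cI.toNat * (i - j)) i (fM + 1) hvk',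
          loopA_succ_traj k n fs (i + cI.toNat * (i - j)) fM hvk']
        exact loopA_stable k n fs hn ((k - pvV n fs (i + cI.toNat * (i - j) + 1)).toNat)
          _ _ _ (le_refl _) (by
            have hm := pvV_mono n fs i (i + cI.toNat * (i - j) + 1) (by omega)
            omega) hfA'
    · -- plain step branch
      refine ⟨i+1, seen, by omega, rfl, le_of_eq (pvV_succ n fs i).symm,
        hgood' _ (by omega), ?_, ?_⟩
      · intro fuel
        rw [loopB_succ_some k n _ _ _ _ d0 v0 _ _ hseen, if_pos hv, if_neg hgain,
          stepB_eq, ← pvS_succ, ← pvV_succ, hday1]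
      · intro fA fA' hfA hfA'
        obtain ⟨f, rfl⟩ : ∃ f, fA = f + 1 := ⟨fA - 1, by omega⟩
        rw [loopA_succ_traj k n fs i f hv]
        exact loopA_stable k n fs hn ((k - pvV n fs (i+1)).toNat) (i+1) f fA'
          (le_refl _) (by omega) hfA'

-- main induction: B's loop equals A's loop at every trajectory point
lemma main_eq (k n : Int) (fs : List (Int × Int)) (hn : 1 ≤ n) (c : Nat) :
    ∀ (i : Nat) (seen : PySem.Dict (List Int) (Int × Int)) (fuelB fuelA : Nat),
    (k - pvV n fs i).toNat ≤ c → 2 * c + 2 ≤ fuelB →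
    2 * (k - pvV n fs i).toNat + 2 ≤ fuelA → pvGood n fs seen i →
    pvLoopB k n fs (pvS n fs i) (pvV n fs i) (1 + (i : Int)) seen fuelB =
    pvLoopA k n (pvFriendsA fs) (pvS n fs i) (pvV n fs i) (1 + (i : Int)) fuelA := by
  induction c with
  | zero =>
    intro i seen fuelB fuelA hc hfB hfA _
    have hv : ¬ pvV n fs i < k := by omega
    rw [loopB_stop _ _ _ _ _ _ _ _ hv (by omega), loopA_stop _ _ _ _ _ _ _ hv (by omega)]
  | succ c ih =>
    intro i seen fuelB fuelA hc hfB hfA hg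
    by_cases hv : pvV n fs i < k
    · obtain ⟨i', seen', hii', hSi', hVi', hg', hB, hA⟩ := one_iter k n fs hn i seen hv hg
      obtain ⟨fb, rfl⟩ : ∃ fb, fuelB = fb + 1 := ⟨fuelB - 1, by omega⟩
      rw [hB fb]
      have hstep : pvLoopA k n (pvFriendsA fs) (pvS n fs i) (pvV n fs i) (1 + (i : Int)) fuelA =
          pvLoopA k n (pvFriendsA fs) (pvS n fs i') (pvV n fs i') (1 + (i' : Int))
            (2 * (k - pvV n fs i').toNat + 2) := by
        rw [loopA_stable k n fs hn ((k - pvV n fs i).toNat) i fuelA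
          (2 * (k - pvV n fs i).toNat + 3) (le_refl _) hfA (by omega)]
        exact hA _ _ (le_refl _) (le_refl _)
      rw [hstep]
      have hmono := pvV_mono n fs i i' (le_of_lt hii')
      by_cases hq : pvV n fs i < pvV n fs i'
      · exact ih i' seen' fb _ (by omega) (by omega) (le_refl _) hg'
      · have hnn := pvS_sum_nonneg n fs i
        have hsz : (pvS n fs (i+1)).sum = 0 := by omega
        have hzero : pvS n fs i' = List.replicate n.toNat 0 := by
          rw [hSi', pvS_succ]
          exact step_sum_zero _ _ _ (by rw [← pvS_succ]; exact hsz)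
        have hv' : pvV n fs i' < k := by omega
        obtain ⟨i'', seen'', hii'', hSi'', hVi'', hg'', hB', hA'⟩ :=
          one_iter k n fs hn i' seen' hv' hg'
        obtain ⟨fb2, rfl⟩ : ∃ fb2, fb = fb2 + 1 := ⟨fb - 1, by omega⟩
        rw [hB' fb2]
        have hgainz : (pvS n fs (i'+1)).sum = n := by
          rw [pvS_succ, hzero]
          exact step_zeros n _ hn
        have hprog : pvV n fs i + 1 ≤ pvV n fs i'' := by omega
        have hstep2 : pvLoopA k n (pvFriendsA fs) (pvS n fs i') (pvV n fs i') (1 + (i' : Int))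
              (2 * (k - pvV n fs i').toNat + 2) =
            pvLoopA k n (pvFriendsA fs) (pvS n fs i'') (pvV n fs i'') (1 + (i'' : Int))
              (2 * (k - pvV n fs i'').toNat + 2) := by
          rw [loopA_stable k n fs hn ((k - pvV n fs i').toNat) i'
            (2 * (k - pvV n fs i').toNat + 2) (2 * (k - pvV n fs i').toNat + 3)
            (le_refl _) (le_refl _) (by omega)]
          exact hA' _ _ (le_refl _) (le_refl _)
        rw [hstep2]
        exact ih i'' seen'' fb2 _ (by omega) (by omega) (le_refl _) hg''
    · rw [loopB_stop _ _ _ _ _ _ _ _ hv (by omega), loopA_stop _ _ _ _ _ _ _ hv (by omega)]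

-- ===== VERDICT (by name: the statement is the Claim_ definition above) =====
theorem office_rostering_spec : Claim_equal_office_rostering := by
  intro n m fs k hdom hpre
  unfold Spec_office_rostering office_rostering office_rostering_alt
  by_cases hk : k ≤ n
  · rw [loopA_stop _ _ _ _ _ _ _ (by omega) (by omega),
        loopB_stop _ _ _ _ _ _ _ _ (by omega) (by omega)]
  · have hn : 1 ≤ n := by
      rcases hpre with h | ⟨h1, _⟩
      · omega
      · exact h1
    have h0 := main_eq k n fs hn ((k - n).toNat) 0 PySem.Dict.empty
      (2 * (k - n).toNat + 2) (2 * (k - n).toNat + 2)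
      (by simp [pvV]) (le_refl _) (by simp [pvV]) (by
        intro s d0 v0 hsome
        simp [PySem.Dict.get?_empty] at hsome)
    simpa [pvS, pvV] using h0.symm
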